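-- pv_equiv track=rewrite | github.com/greenmonn/daily-coding | python/kick_start_google/kick_start_alarm_test.py | calculate_power_of_subarrays
-- ===== SOURCE A (Python) =====
-- def calculate_power_of_subarrays(i, parameter_array):
--     sum = 0
--
--     for start in range(len(parameter_array)):
--         for end in range(start+1, len(parameter_array)+1):
--             subarray = parameter_array[start:end]
--             for index in range(len(subarray)):
--                 base = index + 1
--                 sum += subarray[index] * (base ** i)
--
--     return sum
-- ===== SOURCE B (Python) =====
-- def calculate_power_of_subarrays(i, parameter_array):
--     # O(n): element j contributes a[j] * (n-j) * sum_{p=1}^{j+1} p**i,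
--     # where prefix accumulates the running sum of p**i.
--     n = len(parameter_array)
--     total = 0
--     prefix = 0
--     for j in range(n):
--         prefix += (j + 1) ** i
--         total += parameter_array[j] * (n - j) * prefix
--     return total
-- ===== Notes on version B (the rewrite author's own statement) =====
-- stated objective: faster
-- what changed: Replaces the triple loop over all (start,end,index) with a single pass computing each element's total contribution a[j]*(n-j)*sum_{p=1}^{j+1} p**i via a running prefix sum of p**i.
-- outside the precondition, e.g. on calculate_power_of_subarrays(-1, [2459, 2, 3, 7, 4]): A returns 12361.800000000001, B returns 12361.8; on calculate_power_of_subarrays(-1, [2]): A returns 2.0, B returns 2.0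
import Mathlib
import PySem

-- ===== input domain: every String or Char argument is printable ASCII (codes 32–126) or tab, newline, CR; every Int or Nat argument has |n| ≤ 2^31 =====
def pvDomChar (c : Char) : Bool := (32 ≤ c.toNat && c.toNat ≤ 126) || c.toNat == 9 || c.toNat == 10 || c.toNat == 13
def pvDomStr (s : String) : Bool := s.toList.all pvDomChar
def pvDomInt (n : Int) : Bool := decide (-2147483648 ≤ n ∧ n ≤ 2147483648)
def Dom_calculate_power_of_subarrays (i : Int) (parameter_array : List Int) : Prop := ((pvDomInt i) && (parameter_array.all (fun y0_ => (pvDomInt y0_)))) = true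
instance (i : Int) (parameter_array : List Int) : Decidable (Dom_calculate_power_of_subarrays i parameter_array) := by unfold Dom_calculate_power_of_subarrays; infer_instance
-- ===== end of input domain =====

-- B replaces A's O(n^3) triple loop by a single O(n) pass with a running pre sum of p**i (objective: faster).

-- ===== PORT A =====
-- Literal port of A's triple loop: range(len) → List.range, range(start+1, len+1) → List.range' (start+1) (len-start),
-- the slice xs[start:end] → PySem.List.slice, subarray[index] → getD (index is in range), base ** i → base ^ i.toNat
-- (exact for 0 ≤ i; for i < 0 Python's ** yields a float, excluded by Pre_).
def calculate_power_of_subarrays (i : Int) (parameter_array : List Int) : Int :=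
  (List.range parameter_array.length).foldl (fun (sum : Int) (start : ℕ) =>
    (List.range' (start + 1) (parameter_array.length - start)).foldl (fun (sum : Int) (end_ : ℕ) =>
      let subarray := PySem.List.slice parameter_array (some (start : Int)) (some (end_ : Int))
      (List.range subarray.length).foldl (fun (sum : Int) (index : ℕ) =>
        let base : Int := (index : Int) + 1
        sum + subarray.getD index 0 * base ^ i.toNat) sum) sum) 0

-- ===== PORT B =====
-- Literal port of Source B: one pass, state (pre, total); pre = running sum of (j+1) ** i.
def calculate_power_of_subarrays_alt (i : Int) (parameter_array : List Int) : Int :=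
  let n := parameter_array.length
  ((List.range n).foldl (fun (st : Int × Int) (j : ℕ) =>
      let pre := st.1 + ((j : Int) + 1) ^ i.toNat
      (pre, st.2 + parameter_array.getD j 0 * ((n : Int) - (j : Int)) * pre)) (0, 0)).2

-- ===== PRECONDITION & SPEC =====
-- Pre_ excludes inputs with i < 0 and a nonempty array: there Python's `base ** i` is a float, so A
-- (and B alike) returns a float, not a value of the declared int type.
def Pre_calculate_power_of_subarrays (i : Int) (parameter_array : List Int) : Prop :=
  0 ≤ i ∨ parameter_array = []
instance (i : Int) (parameter_array : List Int) : Decidable (Pre_calculate_power_of_subarrays i parameter_array) := by unfold Pre_calculate_power_of_subarrays; infer_instance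
def pvWitness_calculate_power_of_subarrays : Int × List Int := (2, [1, 2, 3])

def Spec_calculate_power_of_subarrays (i : Int) (parameter_array : List Int) (out : Int) : Prop := out = calculate_power_of_subarrays_alt i parameter_array
instance (i : Int) (parameter_array : List Int) (out : Int) : Decidable (Spec_calculate_power_of_subarrays i parameter_array out) := by unfold Spec_calculate_power_of_subarrays; infer_instance

-- ===== CLAIM (what is proved, stated in full; the proofs are below) =====
def Claim_equal_calculate_power_of_subarrays : Prop := ∀ (i : Int) (parameter_array : List Int), Dom_calculate_power_of_subarrays i parameter_array → Pre_calculate_power_of_subarrays i parameter_array → Spec_calculate_power_of_subarrays i parameter_array (calculate_power_of_subarrays i parameter_array)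

-- ===== LEMMAS AND PROOFS =====

-- positional weight of (0-based) position p: (p+1)^e
def pvPw (e p : ℕ) : Int := ((p : Int) + 1) ^ e
-- S e k = sum of the first k positional weights
def pvS (e k : ℕ) : Int := ∑ p ∈ Finset.range k, pvPw e p

-- a foldl whose body only adds G of the element (for elements of the list) is the sum of G over the list
theorem pv_foldl_body_add (body : Int → ℕ → Int) (G : ℕ → Int) :
    ∀ (l : List ℕ), (∀ s x, x ∈ l → body s x = s + G x) → ∀ (a : Int),
    l.foldl body a = a + (l.map G).sum := by
  intro l
  induction l with
  | nil => simp
  | cons x t ih =>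
      intro h a
      rw [List.foldl_cons, h a x List.mem_cons_self,
        ih (fun s y hy => h s y (List.mem_cons_of_mem x hy))]
      simp [add_assoc]

theorem pv_sum_map_range (G : ℕ → Int) (n : ℕ) :
    ((List.range n).map G).sum = ∑ k ∈ Finset.range n, G k := by
  induction n with
  | zero => simp
  | succ n ih => simp [List.range_succ, Finset.sum_range_succ, ih]

theorem pv_sum_map_range' (G : ℕ → Int) (s m : ℕ) :
    ((List.range' s m).map G).sum = ∑ k ∈ Finset.range m, G (s + k) := by
  rw [List.range'_eq_map_range, List.map_map, pv_sum_map_range]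
  rfl

-- indexing into the slice
theorem pv_getD_drop_take (xs : List Int) (s m idx : ℕ) (h : idx < m)
    (h2 : s + m ≤ xs.length) : ((xs.drop s).take m).getD idx 0 = xs.getD (s + idx) 0 := by
  have hlt : s + idx < xs.length := by omega
  rw [List.getD_eq_getElem?_getD, List.getD_eq_getElem?_getD]
  simp [List.getElem?_drop, h]

-- ∑_{m<K} ∑_{idx≤m} h idx = ∑_{idx<K} (K-idx)·h idx
theorem pv_swap1 (h : ℕ → Int) (K : ℕ) :
    ∑ m ∈ Finset.range K, ∑ idx ∈ Finset.range (m + 1), h idx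
      = ∑ idx ∈ Finset.range K, ((K - idx : ℕ) : Int) * h idx := by
  induction K with
  | zero => simp
  | succ K ih =>
      rw [Finset.sum_range_succ, ih]
      rw [Finset.sum_range_succ (fun idx => ((K + 1 - idx : ℕ) : Int) * h idx)]
      rw [Finset.sum_range_succ h]
      have hK : ∑ idx ∈ Finset.range K, ((K + 1 - idx : ℕ) : Int) * h idx
          = ∑ idx ∈ Finset.range K, (((K - idx : ℕ) : Int) * h idx + h idx) := by
        refine Finset.sum_congr rfl ?_
        intro idx hidx
        have hlt : idx < K := Finset.mem_range.mp hidx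
        have hs : (K + 1 - idx : ℕ) = (K - idx) + 1 := by omega
        rw [hs]; push_cast; ring
      rw [hK, Finset.sum_add_distrib]
      have h1 : ((K + 1 - K : ℕ) : Int) = 1 := by norm_num
      rw [h1]; ring

-- reindex pairs (start, idx) with start+idx < n as (j, start) with start ≤ j < n
theorem pv_swap2 (f : ℕ → ℕ → Int) (n : ℕ) :
    ∑ start ∈ Finset.range n, ∑ idx ∈ Finset.range (n - start), f start (start + idx)
      = ∑ j ∈ Finset.range n, ∑ start ∈ Finset.range (j + 1), f start j := by
  induction n with
  | zero => simp
  | succ n ih =>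
      rw [Finset.sum_range_succ (fun j => ∑ start ∈ Finset.range (j + 1), f start j)]
      rw [← ih]
      rw [Finset.sum_range_succ (fun start => ∑ idx ∈ Finset.range (n + 1 - start), f start (start + idx))]
      have h1 : ∑ start ∈ Finset.range n, ∑ idx ∈ Finset.range (n + 1 - start), f start (start + idx)
          = ∑ start ∈ Finset.range n, (∑ idx ∈ Finset.range (n - start), f start (start + idx) + f start n) := by
        refine Finset.sum_congr rfl ?_
        intro start hs
        have hlt : start < n := Finset.mem_range.mp hs
        have hstep : (n + 1 - start : ℕ) = (n - start) + 1 := by omega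
        rw [hstep, Finset.sum_range_succ]
        congr 2
        omega
      rw [h1, Finset.sum_add_distrib]
      have h2 : (n + 1 - n : ℕ) = 1 := by omega
      rw [h2]
      rw [Finset.sum_range_succ (fun start => f start n)]
      simp [add_assoc]

-- the common closed form of both ports
def pvM (e : ℕ) (xs : List Int) : Int :=
  ∑ j ∈ Finset.range xs.length,
    xs.getD j 0 * ((xs.length : Int) - (j : Int)) * pvS e (j + 1)

theorem pv_alt_eq (i : Int) (xs : List Int) :
    calculate_power_of_subarrays_alt i xs = pvM i.toNat xs := by
  unfold calculate_power_of_subarrays_alt pvM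
  set e := i.toNat
  set n := xs.length with hn
  suffices h : ∀ k : ℕ,
      (List.range k).foldl (fun (st : Int × Int) (j : ℕ) =>
          let pre := st.1 + ((j : Int) + 1) ^ e
          (pre, st.2 + xs.getD j 0 * ((n : Int) - (j : Int)) * pre)) (0, 0)
        = (pvS e k, ∑ j ∈ Finset.range k, xs.getD j 0 * ((n : Int) - (j : Int)) * pvS e (j + 1)) by
    simp only [h n]
  intro k
  induction k with
  | zero => simp [pvS]
  | succ k ih =>
      rw [List.range_succ, List.foldl_append, ih]
      have hS : pvS e (k + 1) = pvS e k + pvPw e k := by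
        simp [pvS, Finset.sum_range_succ]
      simp [Finset.sum_range_succ, hS, pvPw]

theorem pv_a_eq (i : Int) (xs : List Int) :
    calculate_power_of_subarrays i xs = pvM i.toNat xs := by
  unfold calculate_power_of_subarrays
  set e := i.toNat
  set n := xs.length with hn
  -- innermost loop: sum over the subarray positions
  have hInner : ∀ (a : Int) (start end_ : ℕ), start ≤ end_ → end_ ≤ n →
      (List.range (PySem.List.slice xs (some (start : Int)) (some (end_ : Int))).length).foldl
        (fun (sum : Int) (index : ℕ) =>
          let base : Int := (index : Int) + 1
          sum + (PySem.List.slice xs (some (start : Int)) (some (end_ : Int))).getD index 0 * base ^ e) a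
        = a + ∑ idx ∈ Finset.range (end_ - start), xs.getD (start + idx) 0 * pvPw e idx := by
    intro a start end_ h2 h3
    rw [PySem.List.slice_natCast]
    have hlen : ((xs.drop start).take (end_ - start)).length = end_ - start := by
      simp only [List.length_take, List.length_drop]
      omega
    rw [hlen]
    rw [pv_foldl_body_add _
        (fun index => ((xs.drop start).take (end_ - start)).getD index 0 * ((index : Int) + 1) ^ e)
        (List.range (end_ - start)) (fun s x _ => rfl)]
    rw [pv_sum_map_range]
    congr 1
    refine Finset.sum_congr rfl ?_
    intro idx hidx
    have hlt : idx < end_ - start := Finset.mem_range.mp hidx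
    rw [pv_getD_drop_take xs start (end_ - start) idx hlt (by omega)]
    rfl
  -- middle loop: over end_ = start+1 .. n, then swap to per-position multiplicities
  have hMid : ∀ (a : Int) (start : ℕ), start < n →
      (List.range' (start + 1) (n - start)).foldl (fun (sum : Int) (end_ : ℕ) =>
        (List.range (PySem.List.slice xs (some (start : Int)) (some (end_ : Int))).length).foldl
          (fun (sum : Int) (index : ℕ) =>
            let base : Int := (index : Int) + 1
            sum + (PySem.List.slice xs (some (start : Int)) (some (end_ : Int))).getD index 0 * base ^ e) sum) a
        = a + ∑ idx ∈ Finset.range (n - start),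
            ((n - start - idx : ℕ) : Int) * (xs.getD (start + idx) 0 * pvPw e idx) := by
    intro a start hs
    rw [pv_foldl_body_add _
        (fun end_ => ∑ idx ∈ Finset.range (end_ - start), xs.getD (start + idx) 0 * pvPw e idx)
        (List.range' (start + 1) (n - start))
        (fun s end_ hmem => by
          have hb := List.mem_range'_1.mp hmem
          exact hInner s start end_ (by omega) (by omega))]
    rw [pv_sum_map_range']
    have hre : ∑ k ∈ Finset.range (n - start),
        ∑ idx ∈ Finset.range (start + 1 + k - start), xs.getD (start + idx) 0 * pvPw e idx
        = ∑ k ∈ Finset.range (n - start),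
        ∑ idx ∈ Finset.range (k + 1), xs.getD (start + idx) 0 * pvPw e idx := by
      refine Finset.sum_congr rfl ?_
      intro k _
      have hb : start + 1 + k - start = k + 1 := by omega
      rw [hb]
    rw [hre, pv_swap1]
  -- outer loop
  rw [pv_foldl_body_add _
      (fun start => ∑ idx ∈ Finset.range (n - start),
        ((n - start - idx : ℕ) : Int) * (xs.getD (start + idx) 0 * pvPw e idx))
      (List.range n)
      (fun s start hmem => hMid s start (List.mem_range.mp hmem))]
  rw [pv_sum_map_range]
  have hre2 : ∑ start ∈ Finset.range n, ∑ idx ∈ Finset.range (n - start),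
        ((n - start - idx : ℕ) : Int) * (xs.getD (start + idx) 0 * pvPw e idx)
      = ∑ start ∈ Finset.range n, ∑ idx ∈ Finset.range (n - start),
        (fun (start j : ℕ) => ((n - j : ℕ) : Int) * (xs.getD j 0 * pvPw e (j - start))) start (start + idx) := by
    refine Finset.sum_congr rfl ?_
    intro start _
    refine Finset.sum_congr rfl ?_
    intro idx _
    have e1 : n - start - idx = n - (start + idx) := by omega
    have e2 : start + idx - start = idx := by omega
    simp only [e1, e2]
  rw [hre2, pv_swap2 (fun (start j : ℕ) => ((n - j : ℕ) : Int) * (xs.getD j 0 * pvPw e (j - start))) n]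
  unfold pvM
  rw [← hn, zero_add]
  refine Finset.sum_congr rfl ?_
  intro j hj
  beta_reduce
  have hjn : j < n := Finset.mem_range.mp hj
  have hsum : ∑ start ∈ Finset.range (j + 1),
      ((n - j : ℕ) : Int) * (xs.getD j 0 * pvPw e (j - start))
      = ((n - j : ℕ) : Int) * xs.getD j 0 * ∑ start ∈ Finset.range (j + 1), pvPw e (j - start) := by
    rw [Finset.mul_sum]
    refine Finset.sum_congr rfl ?_
    intro start _
    ring
  rw [hsum]
  have hrefl : ∑ start ∈ Finset.range (j + 1), pvPw e (j - start) = pvS e (j + 1) := by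
    have := Finset.sum_range_reflect (fun p => pvPw e p) (j + 1)
    unfold pvS
    rw [← this]
    refine Finset.sum_congr rfl ?_
    intro start hstart
    congr 1
  rw [hrefl]
  have hcast : ((n - j : ℕ) : Int) = (n : Int) - (j : Int) := by
    push_cast [Nat.le_of_lt hjn]
    ring
  rw [hcast]
  ring

theorem pv_ports_eq (i : Int) (xs : List Int) :
    calculate_power_of_subarrays i xs = calculate_power_of_subarrays_alt i xs := by
  rw [pv_a_eq, pv_alt_eq]

-- ===== VERDICT (by name: the statement is the Claim_ definition above) =====
theorem calculate_power_of_subarrays_spec : Claim_equal_calculate_power_of_subarrays := by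
  intro i xs _ _
  unfold Spec_calculate_power_of_subarrays
  exact pv_ports_eq i xs
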